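-- pv_equiv track=rewrite | github.com/andythenorth/iron-horse | bin/refactor_wagon_classes/stepwise_insert.py | find_class_indexes
-- ===== SOURCE A (Python) =====
-- def find_class_indexes(train_lines, class_name):
--     """Finds the start and end indexes of a class definition in train.py."""
--     class_def_line = f"class {class_name}("
--     start_index, end_index = None, None
--
--     # Find the class start
--     for i, line in enumerate(train_lines):
--         if line.strip().startswith(class_def_line):
--             start_index = i
--             break
--
--     if start_index is None:
--         return None, None
--
--     # Find where the class ends
--     for i in range(start_index + 1, len(train_lines)):
--         if train_lines[i].strip().startswith("class "):  # Next class detected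
--             end_index = i
--             break
--
--     if end_index is None:
--         end_index = len(train_lines)  # If it's the last class in the file
--
--     return start_index, end_index
-- ===== SOURCE B (Python) =====
-- def find_class_indexes(train_lines, class_name):
--     """Finds the start and end indexes of a class definition in train.py."""
--     target = f"class {class_name}("
--     # one pass: boundary table of all class-definition start lines
--     class_starts = [i for i, line in enumerate(train_lines)
--                     if line.strip().startswith("class ")]
--     # locate the requested class within the table
--     found = None
--     for pos, i in enumerate(class_starts):
--         if train_lines[i].strip().startswith(target):
--             found = (i, pos)
--             break
--     if found is None:
--         return None, None
--     start_index, pos = found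
--     if pos + 1 < len(class_starts):
--         end_index = class_starts[pos + 1]
--     else:
--         end_index = len(train_lines)
--     return start_index, end_index
-- ===== Notes on version B (the rewrite author's own statement) =====
-- stated objective: alternative
-- what changed: B builds a boundary table of all class-start line indexes in one pass, looks the target class up in that table, and reads the end index as the next table entry (or len), instead of A's two sequential forward scans over the raw lines.
import Mathlib
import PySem

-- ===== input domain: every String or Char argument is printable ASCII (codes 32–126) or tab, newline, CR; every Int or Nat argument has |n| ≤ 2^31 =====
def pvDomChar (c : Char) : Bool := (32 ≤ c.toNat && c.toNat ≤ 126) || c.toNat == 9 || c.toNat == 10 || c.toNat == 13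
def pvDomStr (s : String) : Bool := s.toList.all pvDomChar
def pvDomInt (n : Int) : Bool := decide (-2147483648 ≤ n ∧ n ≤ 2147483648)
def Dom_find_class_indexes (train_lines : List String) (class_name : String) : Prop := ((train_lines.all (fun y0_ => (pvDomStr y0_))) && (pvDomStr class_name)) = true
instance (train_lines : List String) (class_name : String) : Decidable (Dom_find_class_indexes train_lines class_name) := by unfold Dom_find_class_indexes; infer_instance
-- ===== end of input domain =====

-- B replaces A's two sequential forward scans with a one-pass boundary table of all
-- class-start line indexes plus a lookup of the next entry (objective: alternative).


-- ===== PORT A =====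
-- first loop of A: `for i, line in enumerate(train_lines): if line.strip().startswith(pat): start_index = i; break`
def pvAStart (lines : List String) (pat : String) (i : Int) : Option Int :=
  match lines with
  | [] => none
  | l :: rest =>
      if PySem.Str.startswith (PySem.Str.strip l) pat then some i
      else pvAStart rest pat (i + 1)

-- second loop of A: `for i in range(start_index+1, len(train_lines)): if train_lines[i].strip().startswith("class "): end_index = i; break`
-- (indexes produced by range are always in bounds, so the pyGetD default is never used)
def pvAEnd (lines : List String) (idxs : List Int) : Option Int :=
  match idxs with
  | [] => none
  | i :: rest =>
      if PySem.Str.startswith (PySem.Str.strip (PySem.List.pyGetD lines i "")) "class " then some i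
      else pvAEnd lines rest

def find_class_indexes (train_lines : List String) (class_name : String) : Option Int × Option Int :=
  let class_def_line := "class " ++ class_name ++ "("
  match pvAStart train_lines class_def_line 0 with
  | none => (none, none)
  | some start_index =>
      match pvAEnd train_lines (PySem.List.pyRange (start_index + 1) (train_lines.length : Int) 1) with
      | none => (some start_index, some (train_lines.length : Int))
      | some end_index => (some start_index, some end_index)

-- ===== PORT B =====
-- B's comprehension: `[i for i, line in enumerate(train_lines) if line.strip().startswith("class ")]`
def pvClassStarts (lines : List String) (off : Int) : List Int :=
  match lines with
  | [] => []
  | l :: rest =>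
      if PySem.Str.startswith (PySem.Str.strip l) "class " then off :: pvClassStarts rest (off + 1)
      else pvClassStarts rest (off + 1)

-- B's lookup loop: `for pos, i in enumerate(class_starts): if train_lines[i].strip().startswith(target): found = (i, pos); break`
def pvFindStart (lines : List String) (target : String) (starts : List Int) (pos : Int) : Option (Int × Int) :=
  match starts with
  | [] => none
  | i :: rest =>
      if PySem.Str.startswith (PySem.Str.strip (PySem.List.pyGetD lines i "")) target then some (i, pos)
      else pvFindStart lines target rest (pos + 1)

def find_class_indexes_alt (train_lines : List String) (class_name : String) : Option Int × Option Int :=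
  let target := "class " ++ class_name ++ "("
  let class_starts := pvClassStarts train_lines 0
  match pvFindStart train_lines target class_starts 0 with
  | none => (none, none)
  | some (start_index, pos) =>
      (some start_index,
       some (if pos + 1 < (class_starts.length : Int)
             then PySem.List.pyGetD class_starts (pos + 1) 0
             else (train_lines.length : Int)))

-- ===== PRECONDITION & SPEC =====
def Spec_find_class_indexes (train_lines : List String) (class_name : String) (out : Option Int × Option Int) : Prop := out = find_class_indexes_alt train_lines class_name
instance (train_lines : List String) (class_name : String) (out : Option Int × Option Int) : Decidable (Spec_find_class_indexes train_lines class_name out) := by unfold Spec_find_class_indexes; infer_instance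

-- ===== CLAIM (what is proved, stated in full; the proofs are below) =====
def Claim_equal_find_class_indexes : Prop := ∀ (train_lines : List String) (class_name : String), Dom_find_class_indexes train_lines class_name → Spec_find_class_indexes train_lines class_name (find_class_indexes train_lines class_name)

-- ===== LEMMAS AND PROOFS =====


-- first-match index of a predicate, the common spec both ports are reduced to
def pvFirst (p : String → Bool) : List String → Option Nat
  | [] => none
  | x :: xs => if p x then some 0 else (pvFirst p xs).map (· + 1)

theorem pv_TP (l name : String)
    (h : PySem.Str.startswith (PySem.Str.strip l) ("class " ++ name ++ "(") = true) :
    PySem.Str.startswith (PySem.Str.strip l) "class " = true := by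
  simp only [PySem.Str.startswith_eq] at h ⊢
  rw [PySem.Chars.startswith_iff] at h ⊢
  refine List.IsPrefix.trans ?_ h
  rw [String.toList_append, String.toList_append, List.append_assoc]
  exact List.prefix_append _ _

theorem pvFirst_none {p : String → Bool} {xs : List String} (h : pvFirst p xs = none) :
    ∀ l ∈ xs, p l = false := by
  induction xs with
  | nil => simp
  | cons x rest ih =>
      simp only [pvFirst] at h
      split at h
      · simp at h
      · intro l hl
        rcases List.mem_cons.mp hl with rfl | hl
        · exact eq_false_of_ne_true ‹_›
        · exact ih (by simpa using h) l hl

theorem pvFirst_some {p : String → Bool} {xs : List String} {k : Nat}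
    (h : pvFirst p xs = some k) :
    ∃ u x v, xs = u ++ x :: v ∧ u.length = k ∧ p x = true ∧ ∀ l ∈ u, p l = false := by
  induction xs generalizing k with
  | nil => simp [pvFirst] at h
  | cons y rest ih =>
      simp only [pvFirst] at h
      split at h
      · exact ⟨[], y, rest, rfl, by simpa using Option.some.inj h, ‹_›, by simp⟩
      · cases hm : pvFirst p rest with
        | none => rw [hm] at h; simp at h
        | some m =>
            rw [hm] at h
            simp only [Option.map_some] at h
            obtain ⟨u, x, v, rfl, hlen, hx, hu⟩ := ih hm
            refine ⟨y :: u, x, v, rfl, ?_, hx, ?_⟩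
            · simp [hlen, ← Option.some.inj h]
            · intro l hl
              rcases List.mem_cons.mp hl with rfl | hl
              · exact eq_false_of_ne_true ‹_›
              · exact hu l hl

theorem pvAStart_eq (pat : String) (xs : List String) (i : Int) :
    pvAStart xs pat i
      = (pvFirst (fun l => PySem.Str.startswith (PySem.Str.strip l) pat) xs).map
          (fun k : Nat => i + (k : Int)) := by
  induction xs generalizing i with
  | nil => simp [pvAStart, pvFirst]
  | cons x rest ih =>
      simp only [pvAStart, pvFirst]
      split
      · simp
      · rw [ih]
        cases h : pvFirst (fun l => PySem.Str.startswith (PySem.Str.strip l) pat) rest with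
        | none => simp
        | some m =>
            simp only [Option.map_some, Option.some.injEq]
            push_cast
            ring

theorem pvAEnd_eq (u v : List String) :
    pvAEnd (u ++ v) (PySem.List.pyRange (u.length : Int) (((u ++ v).length : Nat) : Int) 1)
      = (pvFirst (fun l => PySem.Str.startswith (PySem.Str.strip l) "class ") v).map
          (fun m : Nat => (u.length : Int) + (m : Int)) := by
  induction v generalizing u with
  | nil =>
      rw [List.append_nil, PySem.List.pyRange_one_eq_nil (by omega)]
      simp [pvAEnd, pvFirst]
  | cons x rest ih =>
      have hlt : (u.length : Int) < (((u ++ x :: rest).length : Nat) : Int) := by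
        simp
      rw [PySem.List.pyRange_one_cons hlt]
      simp only [pvAEnd]
      have hget : PySem.List.pyGetD (u ++ x :: rest) (u.length : Int) "" = x := by
        rw [PySem.List.pyGetD_natCast]
        rw [List.getD_eq_getElem _ _ (by simp)]
        simp [List.getElem_append_right (Nat.le_refl u.length)]
      rw [hget]
      simp only [pvFirst]
      split
      · simp
      · have h2 := ih (u ++ [x])
        have e1 : (u ++ [x]) ++ rest = u ++ x :: rest := by simp
        have e2 : (((u ++ [x]).length : Nat) : Int) = (u.length : Int) + 1 := by
          simp
        rw [e1, e2] at h2
        rw [h2]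
        cases hr : pvFirst (fun l => PySem.Str.startswith (PySem.Str.strip l) "class ") rest with
        | none => simp
        | some m =>
            simp only [Option.map_some, Option.some.injEq]
            push_cast
            ring

theorem pvClassStarts_append (xs ys : List String) (off : Int) :
    pvClassStarts (xs ++ ys) off
      = pvClassStarts xs off ++ pvClassStarts ys (off + (xs.length : Int)) := by
  induction xs generalizing off with
  | nil => simp [pvClassStarts]
  | cons x rest ih =>
      have e : off + 1 + ((rest.length : Nat) : Int) = off + (((x :: rest).length : Nat) : Int) := by
        push_cast [List.length_cons]
        ring
      simp only [List.cons_append, pvClassStarts]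
      split
      · rw [ih, e]
        simp
      · rw [ih, e]

theorem pvClassStarts_mem {xs : List String} {off i : Int}
    (h : i ∈ pvClassStarts xs off) :
    ∃ j : Nat, ∃ hj : j < xs.length, i = off + (j : Int)
      ∧ PySem.Str.startswith (PySem.Str.strip xs[j]) "class " = true := by
  induction xs generalizing off with
  | nil => simp [pvClassStarts] at h
  | cons x rest ih =>
      have step : i ∈ pvClassStarts rest (off + 1) →
          ∃ j : Nat, ∃ hj : j < (x :: rest).length, i = off + (j : Int)
            ∧ PySem.Str.startswith (PySem.Str.strip (x :: rest)[j]) "class " = true := by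
        intro hm
        obtain ⟨j, hj, hij, hP⟩ := ih hm
        refine ⟨j + 1, by simpa using Nat.succ_lt_succ hj, ?_, ?_⟩
        · rw [hij]; push_cast; ring
        · rw [List.getElem_cons_succ]; exact hP
      by_cases hPx : PySem.Str.startswith (PySem.Str.strip x) "class " = true
      · rw [pvClassStarts, if_pos hPx] at h
        rcases List.mem_cons.mp h with rfl | hm
        · refine ⟨0, by simp, by simp, ?_⟩
          rw [List.getElem_cons_zero]; exact hPx
        · exact step hm
      · rw [pvClassStarts, if_neg hPx] at h
        exact step h

theorem pvFindStart_none {lines : List String} {target : String} {s : List Int} (pos : Int)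
    (h : ∀ i ∈ s,
      PySem.Str.startswith (PySem.Str.strip (PySem.List.pyGetD lines i "")) target = false) :
    pvFindStart lines target s pos = none := by
  induction s generalizing pos with
  | nil => rfl
  | cons i rest ih =>
      simp only [pvFindStart]
      rw [h i (by simp)]
      simp only [Bool.false_eq_true, if_false]
      exact ih (pos + 1) (fun j hj => h j (by simp [hj]))

theorem pvFindStart_append (lines : List String) (target : String) (s1 s2 : List Int) (pos : Int)
    (h : ∀ i ∈ s1,
      PySem.Str.startswith (PySem.Str.strip (PySem.List.pyGetD lines i "")) target = false) :
    pvFindStart lines target (s1 ++ s2) pos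
      = pvFindStart lines target s2 (pos + ((s1.length : Nat) : Int)) := by
  induction s1 generalizing pos with
  | nil => simp
  | cons i rest ih =>
      have e : pos + 1 + ((rest.length : Nat) : Int) = pos + (((i :: rest).length : Nat) : Int) := by
        push_cast [List.length_cons]
        ring
      simp only [List.cons_append, pvFindStart]
      rw [h i (by simp)]
      simp only [Bool.false_eq_true, if_false]
      rw [ih (pos + 1) (fun j hj => h j (by simp [hj])), e]

theorem pvClassStarts_head (v : List String) (off : Int) :
    (pvClassStarts v off).head?
      = (pvFirst (fun l => PySem.Str.startswith (PySem.Str.strip l) "class ") v).map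
          (fun m : Nat => off + (m : Int)) := by
  induction v generalizing off with
  | nil => simp [pvClassStarts, pvFirst]
  | cons x rest ih =>
      simp only [pvClassStarts, pvFirst]
      split
      · simp
      · rw [ih]
        cases hr : pvFirst (fun l => PySem.Str.startswith (PySem.Str.strip l) "class ") rest with
        | none => simp
        | some m =>
            simp only [Option.map_some, Option.some.injEq]
            push_cast
            ring

-- ===== VERDICT (by name: the statement is the Claim_ definition above) =====
theorem find_class_indexes_spec : Claim_equal_find_class_indexes := by
  intro lines name _
  unfold Spec_find_class_indexes
  show find_class_indexes lines name = find_class_indexes_alt lines name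
  simp only [find_class_indexes, find_class_indexes_alt]
  rw [pvAStart_eq]
  cases hf : pvFirst (fun l => PySem.Str.startswith (PySem.Str.strip l)
      ("class " ++ name ++ "(")) lines with
  | none =>
      have hB : pvFindStart lines ("class " ++ name ++ "(") (pvClassStarts lines 0) 0 = none := by
        apply pvFindStart_none
        intro i hi
        obtain ⟨j, hj, hij, _⟩ := pvClassStarts_mem hi
        have hg : PySem.List.pyGetD lines i "" = lines[j] := by
          rw [hij, zero_add, PySem.List.pyGetD_natCast, List.getD_eq_getElem _ _ hj]
        rw [hg]
        exact pvFirst_none hf _ (List.getElem_mem hj)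
      rw [hB]
      simp
  | some k =>
      obtain ⟨u, x, v, rfl, hlen, hTx, hu⟩ := pvFirst_some hf
      subst hlen
      have hPx := pv_TP x name hTx
      -- boundary-table decomposition: starts = S1 ++ u.length :: S2
      have hS : pvClassStarts (u ++ x :: v) 0
          = pvClassStarts u 0
            ++ ((u.length : Int) :: pvClassStarts v ((u.length : Int) + 1)) := by
        rw [pvClassStarts_append, zero_add, pvClassStarts, if_pos hPx]
      set S1 := pvClassStarts u 0 with hS1
      set S2 := pvClassStarts v ((u.length : Int) + 1) with hS2
      -- every table entry before u.length fails the target test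
      have hskip : ∀ i ∈ S1,
          PySem.Str.startswith (PySem.Str.strip (PySem.List.pyGetD (u ++ x :: v) i ""))
            ("class " ++ name ++ "(") = false := by
        intro i hi
        obtain ⟨j, hj, hij, _⟩ := pvClassStarts_mem hi
        have hg : PySem.List.pyGetD (u ++ x :: v) i "" = u[j] := by
          rw [hij, zero_add, PySem.List.pyGetD_natCast,
            List.getD_eq_getElem _ _ (by simp; omega)]
          exact List.getElem_append_left hj
        rw [hg]
        exact hu _ (List.getElem_mem hj)
      -- B's lookup finds the class at table position S1.length
      have hfind : pvFindStart (u ++ x :: v) ("class " ++ name ++ "(")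
            (S1 ++ ((u.length : Int) :: S2)) 0
          = some ((u.length : Int), (S1.length : Int)) := by
        rw [pvFindStart_append _ _ _ _ _ hskip, pvFindStart]
        have hg : PySem.List.pyGetD (u ++ x :: v) (u.length : Int) "" = x := by
          rw [PySem.List.pyGetD_natCast, List.getD_eq_getElem _ _ (by simp)]
          simp [List.getElem_append_right (Nat.le_refl u.length)]
        rw [hg, if_pos hTx, zero_add]
      -- A's second scan, via pvAEnd_eq at the split point u ++ [x]
      have hA := pvAEnd_eq (u ++ [x]) v
      simp only [List.append_assoc, List.cons_append, List.nil_append] at hA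
      rw [hS, hfind]
      simp only [Option.map_some]
      have e1 : (0 : Int) + (u.length : Int) + 1 = (((u ++ [x]).length : Nat) : Int) := by
        simp
      rw [e1, hA]
      cases hv : pvFirst (fun l => PySem.Str.startswith (PySem.Str.strip l) "class ") v with
      | none =>
          have hS2nil : S2 = [] := by
            have hhead := pvClassStarts_head v ((u.length : Int) + 1)
            rw [hv, ← hS2] at hhead
            exact List.head?_eq_none_iff.mp (by simpa using hhead)
          simp only [Option.map_none, hS2nil]
          rw [if_neg (by push_cast [List.length_append, List.length_cons, List.length_nil]; omega)]
          simp only [Prod.mk.injEq, Option.some.injEq]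
          exact ⟨by omega, trivial⟩
      | some m =>
          have hhead := pvClassStarts_head v ((u.length : Int) + 1)
          rw [hv, ← hS2] at hhead
          simp only [Option.map_some] at hhead
          obtain ⟨z, S2', hS2c⟩ : ∃ z S2', S2 = z :: S2' := by
            cases hc : S2 with
            | nil => rw [hc] at hhead; simp at hhead
            | cons a b => exact ⟨a, b, rfl⟩
          have hz : z = (u.length : Int) + 1 + (m : Int) := by
            rw [hS2c] at hhead
            simpa using hhead
          simp only [Option.map_some, hS2c]
          have hcond : ((S1.length : Int) + 1 < (((S1 ++ ((u.length : Int) :: z :: S2')).length : Nat) : Int)) := by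
            push_cast [List.length_append, List.length_cons]
            omega
          rw [if_pos hcond]
          have hgz : PySem.List.pyGetD (S1 ++ ((u.length : Int) :: z :: S2'))
              ((S1.length : Int) + 1) 0 = z := by
            rw [show ((S1.length : Int) + 1) = ((S1.length + 1 : Nat) : Int) by push_cast; ring]
            rw [PySem.List.pyGetD_natCast,
              List.getD_eq_getElem _ _ (by simp [List.length_append])]
            rw [List.getElem_append_right (by omega)]
            simp
          rw [hgz, hz]
          simp only [Prod.mk.injEq, Option.some.injEq]
          simp only [List.length_append, List.length_cons, List.length_nil]
          push_cast
          omega
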